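-- pv_equiv track=rewrite | github.com/zhang403/MoRFs_TransFuse | case.py | find_fp_regions
-- ===== SOURCE A (Python) =====
-- def find_fp_regions(true_arr, pred_arr):
--     fp_regions = []
--     start = None
--     seq_len = len(true_arr)
--
--     for i in range(seq_len):
--         if true_arr[i] == 0 and pred_arr[i] == 1:
--             if start is None:
--                 start = i
--         else:
--             if start is not None:
--                 end = i - 1
--                 fp_regions.append((start, end, end - start + 1))
--                 start = None
--
--     if start is not None:
--         end = seq_len - 1
--         fp_regions.append((start, end, end - start + 1))
--
--     return fp_regions
-- ===== SOURCE B (Python) =====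
-- def find_fp_regions(true_arr, pred_arr):
--     n = len(true_arr)
--     mask = [true_arr[i] == 0 and pred_arr[i] == 1 for i in range(n)]
--     res = []
--     i = 0
--     while i < n:
--         j = i
--         while j < n and mask[j] == mask[i]:
--             j += 1
--         if mask[i]:
--             res.append((i, j - 1, j - i))
--         i = j
--     return res
-- ===== Notes on version B (the rewrite author's own statement) =====
-- stated objective: alternative
-- what changed: Replaces A's start/None state machine with a precomputed boolean mask followed by a nested two-pointer run scan that jumps over each maximal run of equal mask values and emits one region per true run.
import Mathlib
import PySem

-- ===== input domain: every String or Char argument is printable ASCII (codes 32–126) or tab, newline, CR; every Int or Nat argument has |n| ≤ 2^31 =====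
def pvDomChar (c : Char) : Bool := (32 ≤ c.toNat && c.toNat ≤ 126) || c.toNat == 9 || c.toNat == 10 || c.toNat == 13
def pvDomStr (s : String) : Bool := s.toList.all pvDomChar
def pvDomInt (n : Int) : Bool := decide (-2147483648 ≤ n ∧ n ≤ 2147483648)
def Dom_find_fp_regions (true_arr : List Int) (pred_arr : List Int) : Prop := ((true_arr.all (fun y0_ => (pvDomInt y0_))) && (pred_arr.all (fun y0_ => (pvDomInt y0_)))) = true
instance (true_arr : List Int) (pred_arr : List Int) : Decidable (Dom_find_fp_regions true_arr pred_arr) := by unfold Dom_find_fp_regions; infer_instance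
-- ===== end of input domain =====

-- B replaces A's start/None state machine with a precomputed mask and a nested run-scan over
-- maximal runs of equal mask values (objective: alternative decomposition, same O(n) cost).


-- ===== PORT A =====
-- loop body of A (state = (fp_regions, start))
def pvStepA (true_arr pred_arr : List Int) (s : List (Int × Int × Int) × Option Int) (i : Int) :
    List (Int × Int × Int) × Option Int :=
  if (PySem.List.pyGet? true_arr i).getD 0 = 0 ∧ (PySem.List.pyGet? pred_arr i).getD 0 = 1 then
    match s.2 with
    | none => (s.1, some i)
    | some _ => s
  else
    match s.2 with
    | some start => (s.1 ++ [(start, i - 1, (i - 1) - start + 1)], none)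
    | none => s

-- Literal port of A's loop; on an admitted input every index is in range, so the
-- pyGet?-then-getD read is exact there.
def find_fp_regions (true_arr : List Int) (pred_arr : List Int) : List (Int × Int × Int) :=
  let seq_len : Int := true_arr.length
  let st := (PySem.List.pyRange 0 seq_len 1).foldl (pvStepA true_arr pred_arr) ([], none)
  match st.2 with
  | some start => st.1 ++ [(start, seq_len - 1, (seq_len - 1) - start + 1)]
  | none => st.1

-- ===== PORT B =====
-- the mask comprehension of Source B (exact on admitted inputs, as for port A)
def pvMask (true_arr : List Int) (pred_arr : List Int) : List Bool :=
  (PySem.List.pyRange 0 (true_arr.length : Int) 1).map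
    (fun i => ((PySem.List.pyGet? true_arr i).getD 0 == 0) && ((PySem.List.pyGet? pred_arr i).getD 0 == 1))

-- inner while loop of Source B: advance j while mask[j] == v (the fuel argument only totalizes
-- the loop: it is called with fuel = mask.length - j, so fuel = 0 exactly when j = mask.length)
def pvRunEnd (mask : List Bool) (v : Bool) : Nat → Nat → Nat
  | 0, j => j
  | fuel + 1, j => if mask.getD j false = v then pvRunEnd mask v fuel (j + 1) else j

-- outer while loop of Source B (fuel bounds the iteration count; each iteration moves i forward)
def pvOuter (mask : List Bool) : Nat → Nat → List (Int × Int × Int) → List (Int × Int × Int)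
  | 0, _, res => res
  | fuel + 1, i, res =>
    if i < mask.length then
      let j := pvRunEnd mask (mask.getD i false) (mask.length - i) i
      let res' := if mask.getD i false then res ++ [((i : Int), (j : Int) - 1, (j : Int) - (i : Int))] else res
      pvOuter mask fuel j res'
    else res

def find_fp_regions_alt (true_arr : List Int) (pred_arr : List Int) : List (Int × Int × Int) :=
  pvOuter (pvMask true_arr pred_arr) (pvMask true_arr pred_arr).length 0 []

-- ===== PRECONDITION & SPEC =====
-- Pre_ excludes exactly the inputs where A raises IndexError: some i with true_arr[i] == 0 but
-- i out of range for pred_arr (B raises there identically).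
def Pre_find_fp_regions (true_arr : List Int) (pred_arr : List Int) : Prop :=
  ∀ i < true_arr.length, true_arr.getD i 0 = 0 → i < pred_arr.length
instance (true_arr : List Int) (pred_arr : List Int) : Decidable (Pre_find_fp_regions true_arr pred_arr) := by unfold Pre_find_fp_regions; infer_instance
def pvWitness_find_fp_regions : List Int × List Int := ([0, 1, 0, 0], [1, 0, 1, 1])

def Spec_find_fp_regions (true_arr : List Int) (pred_arr : List Int) (out : List (Int × Int × Int)) : Prop := out = find_fp_regions_alt true_arr pred_arr
instance (true_arr : List Int) (pred_arr : List Int) (out : List (Int × Int × Int)) : Decidable (Spec_find_fp_regions true_arr pred_arr out) := by unfold Spec_find_fp_regions; infer_instance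

-- ===== CLAIM (what is proved, stated in full; the proofs are below) =====
def Claim_equal_find_fp_regions : Prop := ∀ (true_arr : List Int) (pred_arr : List Int), Dom_find_fp_regions true_arr pred_arr → Pre_find_fp_regions true_arr pred_arr → Spec_find_fp_regions true_arr pred_arr (find_fp_regions true_arr pred_arr)

-- ===== LEMMAS AND PROOFS =====

-- canonical single-pass scan both ports are reduced to
def pvScan : List Bool → Int → Option Int → List (Int × Int × Int)
  | [], _, none => []
  | [], i, some s => [(s, i - 1, (i - 1) - s + 1)]
  | b :: rest, i, st =>
    if b then pvScan rest (i + 1) (match st with | none => some i | some s => some s)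
    else match st with
      | some s => (s, i - 1, (i - 1) - s + 1) :: pvScan rest (i + 1) none
      | none => pvScan rest (i + 1) none

theorem bridgeA (true_arr pred_arr : List Int) :
    ∀ (l : List Int) (i : Int) (acc : List (Int × Int × Int)) (st : Option Int),
      i ≤ (true_arr.length : Int) → l = PySem.List.pyRange i (true_arr.length : Int) 1 →
      (match (l.foldl (pvStepA true_arr pred_arr) (acc, st)).2 with
        | some start => (l.foldl (pvStepA true_arr pred_arr) (acc, st)).1 ++ [(start, (true_arr.length : Int) - 1, ((true_arr.length : Int) - 1) - start + 1)]
        | none => (l.foldl (pvStepA true_arr pred_arr) (acc, st)).1)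
      = acc ++ pvScan (l.map (fun i => ((PySem.List.pyGet? true_arr i).getD 0 == 0) && ((PySem.List.pyGet? pred_arr i).getD 0 == 1))) i st := by
  suffices h : ∀ (k : Nat) (i : Int) (acc : List (Int × Int × Int)) (st : Option Int),
      i ≤ (true_arr.length : Int) → ((true_arr.length : Int) - i).toNat = k →
      (match ((PySem.List.pyRange i (true_arr.length : Int) 1).foldl (pvStepA true_arr pred_arr) (acc, st)).2 with
        | some start => ((PySem.List.pyRange i (true_arr.length : Int) 1).foldl (pvStepA true_arr pred_arr) (acc, st)).1 ++ [(start, (true_arr.length : Int) - 1, ((true_arr.length : Int) - 1) - start + 1)]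
        | none => ((PySem.List.pyRange i (true_arr.length : Int) 1).foldl (pvStepA true_arr pred_arr) (acc, st)).1)
      = acc ++ pvScan ((PySem.List.pyRange i (true_arr.length : Int) 1).map (fun j => ((PySem.List.pyGet? true_arr j).getD 0 == 0) && ((PySem.List.pyGet? pred_arr j).getD 0 == 1))) i st by
    intro l i acc st hle hl
    subst hl
    exact h _ i acc st hle rfl
  intro k
  induction k with
  | zero =>
    intro i acc st hle hk
    rw [PySem.List.pyRange_one_eq_nil (by omega)]
    have hin : i = (true_arr.length : Int) := by omega
    subst hin
    cases st with
    | none => simp [pvScan]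
    | some s => simp [pvScan]
  | succ k ih =>
    intro i acc st hle hk
    have hlt : i < (true_arr.length : Int) := by omega
    rw [PySem.List.pyRange_one_cons hlt]
    by_cases hc : (PySem.List.pyGet? true_arr i).getD 0 = 0 ∧ (PySem.List.pyGet? pred_arr i).getD 0 = 1
    · have hb : (((PySem.List.pyGet? true_arr i).getD 0 == 0) && ((PySem.List.pyGet? pred_arr i).getD 0 == 1)) = true := by
        simp [hc.1, hc.2]
      cases st with
      | none =>
        simp only [List.map_cons, List.foldl_cons, pvStepA, if_pos hc, pvScan, hb, if_true]
        exact ih (i + 1) acc (some i) (by omega) (by omega)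
      | some s =>
        simp only [List.map_cons, List.foldl_cons, pvStepA, if_pos hc, pvScan, hb, if_true]
        exact ih (i + 1) acc (some s) (by omega) (by omega)
    · have hb : (((PySem.List.pyGet? true_arr i).getD 0 == 0) && ((PySem.List.pyGet? pred_arr i).getD 0 == 1)) = false := by
        rcases Decidable.not_and_iff_not_or_not.mp hc with h | h <;> simp [h]
      cases st with
      | none =>
        simp only [List.map_cons, List.foldl_cons, pvStepA, if_neg hc, pvScan, hb, Bool.false_eq_true, if_false]
        exact ih (i + 1) acc none (by omega) (by omega)
      | some s =>
        simp only [List.map_cons, List.foldl_cons, pvStepA, if_neg hc, pvScan, hb, Bool.false_eq_true, if_false]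
        rw [ih (i + 1) (acc ++ [(s, i - 1, i - 1 - s + 1)]) none (by omega) (by omega)]
        simp

theorem pvRunEnd_ge (mask : List Bool) (v : Bool) :
    ∀ (fuel j : Nat), j ≤ pvRunEnd mask v fuel j := by
  intro fuel
  induction fuel with
  | zero => intro j; exact le_rfl
  | succ fuel ih =>
    intro j
    rw [pvRunEnd]
    split
    · exact le_trans (by omega) (ih (j + 1))
    · exact le_rfl

theorem pvRunEnd_le (mask : List Bool) (v : Bool) :
    ∀ (fuel j : Nat), fuel + j = mask.length → pvRunEnd mask v fuel j ≤ mask.length := by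
  intro fuel
  induction fuel with
  | zero => intro j hf; rw [pvRunEnd]; omega
  | succ fuel ih =>
    intro j hf
    rw [pvRunEnd]
    split
    · exact ih (j + 1) (by omega)
    · omega

theorem pvRunEnd_run (mask : List Bool) (v : Bool) :
    ∀ (fuel j : Nat) (m : Nat), j ≤ m → m < pvRunEnd mask v fuel j → mask.getD m false = v := by
  intro fuel
  induction fuel with
  | zero => intro j m h1 h2; rw [pvRunEnd] at h2; omega
  | succ fuel ih =>
    intro j m h1 h2
    rw [pvRunEnd] at h2
    by_cases hj : mask.getD j false = v
    · rw [if_pos hj] at h2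
      rcases Nat.eq_or_lt_of_le h1 with hm | hm
      · exact hm ▸ hj
      · exact ih (j + 1) m hm h2
    · rw [if_neg hj] at h2; omega

theorem pvRunEnd_stop (mask : List Bool) (v : Bool) :
    ∀ (fuel j : Nat), fuel + j = mask.length → pvRunEnd mask v fuel j < mask.length →
      mask.getD (pvRunEnd mask v fuel j) false ≠ v := by
  intro fuel
  induction fuel with
  | zero => intro j hf hlt; rw [pvRunEnd] at hlt ⊢; omega
  | succ fuel ih =>
    intro j hf hlt
    rw [pvRunEnd] at hlt ⊢
    by_cases hj : mask.getD j false = v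
    · rw [if_pos hj] at hlt ⊢; exact ih (j + 1) (by omega) hlt
    · rw [if_neg hj] at hlt ⊢; exact hj

-- a maximal all-false run contributes nothing to the scan
theorem pvAuxF (mask : List Bool) (jn : Nat) (hjl : jn ≤ mask.length) :
    ∀ (k i : Nat), jn - i = k → i ≤ jn →
      (∀ m, i ≤ m → m < jn → mask.getD m false = false) →
      pvScan (mask.drop i) i none = pvScan (mask.drop jn) jn none := by
  intro k
  induction k with
  | zero =>
    intro i hk hle _
    have : i = jn := by omega
    subst this; rfl
  | succ k ih =>
    intro i hk hle hrun
    have hij : i < jn := by omega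
    have hil : i < mask.length := by omega
    rw [List.drop_eq_getElem_cons hil]
    have hfi : mask[i] = false := by
      rw [← List.getD_eq_getElem mask false hil]; exact hrun i le_rfl hij
    rw [hfi]
    have : pvScan (false :: mask.drop (i + 1)) i none = pvScan (mask.drop (i + 1)) ((i : Int) + 1) none := by
      simp [pvScan]
    rw [this]
    have hc : ((i : Int) + 1) = ((i + 1 : Nat) : Int) := by push_cast; ring
    rw [hc]
    exact ih (i + 1) (by omega) (by omega) (fun m h1 h2 => hrun m (by omega) h2)

-- a maximal all-true run emits exactly one region, closing at its end
theorem pvAuxT (mask : List Bool) (jn : Nat) (hjl : jn ≤ mask.length) (s : Int)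
    (hstop : jn < mask.length → mask.getD jn false = false) :
    ∀ (k i : Nat), jn - i = k → i ≤ jn →
      (∀ m, i ≤ m → m < jn → mask.getD m false = true) →
      pvScan (mask.drop i) i (some s)
        = (s, (jn : Int) - 1, ((jn : Int) - 1) - s + 1) :: pvScan (mask.drop jn) jn none := by
  intro k
  induction k with
  | zero =>
    intro i hk hle _
    have hij : i = jn := by omega
    subst hij
    rcases Nat.eq_or_lt_of_le hjl with he | hlt
    · rw [List.drop_eq_nil_iff.mpr (by omega)]
      simp [pvScan]
    · have hf := hstop hlt
      rw [List.getD_eq_getElem mask false hlt] at hf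
      rw [List.drop_eq_getElem_cons hlt, hf]
      simp [pvScan]
  | succ k ih =>
    intro i hk hle hrun
    have hij : i < jn := by omega
    have hil : i < mask.length := by omega
    rw [List.drop_eq_getElem_cons hil]
    have hti : mask[i] = true := by
      rw [← List.getD_eq_getElem mask false hil]; exact hrun i le_rfl hij
    rw [hti]
    have hstep : pvScan (true :: mask.drop (i + 1)) i (some s)
        = pvScan (mask.drop (i + 1)) ((i + 1 : Nat) : Int) (some s) := by
      simp [pvScan]
    rw [hstep]
    exact ih (i + 1) (by omega) (by omega) (fun m h1 h2 => hrun m (by omega) h2)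

theorem bridgeB (mask : List Bool) :
    ∀ (fuel i : Nat) (res : List (Int × Int × Int)), mask.length - i ≤ fuel →
      pvOuter mask fuel i res = res ++ pvScan (mask.drop i) i none := by
  intro fuel
  induction fuel with
  | zero =>
    intro i res hf
    rw [pvOuter, List.drop_eq_nil_iff.mpr (by omega)]
    simp [pvScan]
  | succ fuel ih =>
    intro i res hf
    rw [pvOuter]
    by_cases h : i < mask.length
    · rw [if_pos h]
      have hinv : (mask.length - i) + i = mask.length := by omega
      have hij : i < pvRunEnd mask (mask.getD i false) (mask.length - i) i := by
        rcases hfe : mask.length - i with _ | f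
        · omega
        · rw [pvRunEnd, if_pos rfl]
          have := pvRunEnd_ge mask (mask.getD i false) f (i + 1)
          omega
      have hjl := pvRunEnd_le mask (mask.getD i false) (mask.length - i) i hinv
      have hrun := pvRunEnd_run mask (mask.getD i false) (mask.length - i) i
      have hstop := pvRunEnd_stop mask (mask.getD i false) (mask.length - i) i hinv
      set j := pvRunEnd mask (mask.getD i false) (mask.length - i) i with hjdef
      rw [ih j _ (by omega)]
      rw [List.drop_eq_getElem_cons h, ← List.getD_eq_getElem mask false h]
      cases hv : mask.getD i false with
      | false =>
        rw [if_neg (by simp)]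
        have h1 : pvScan (false :: mask.drop (i + 1)) i none
            = pvScan (mask.drop (i + 1)) ((i + 1 : Nat) : Int) none := by
          simp [pvScan]
        rw [h1]
        rw [pvAuxF mask j hjl (j - (i + 1)) (i + 1) rfl (by omega)
          (fun m h1 h2 => (hrun m (by omega) h2).trans hv)]
      | true =>
        rw [if_pos rfl]
        have h1 : pvScan (true :: mask.drop (i + 1)) i none
            = pvScan (mask.drop (i + 1)) ((i + 1 : Nat) : Int) (some (i : Int)) := by
          simp [pvScan]
        rw [h1]
        have hstopf : j < mask.length → mask.getD j false = false := by
          intro hlt; cases hgj : mask.getD j false with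
          | false => rfl
          | true => exact absurd (hv ▸ hgj) (hstop hlt)
        rw [pvAuxT mask j hjl (i : Int) hstopf (j - (i + 1)) (i + 1) rfl (by omega)
          (fun m h1 h2 => (hrun m (by omega) h2).trans hv)]
        have : ((j : Int) - 1) - (i : Int) + 1 = (j : Int) - (i : Int) := by omega
        rw [this]
        simp
    · rw [if_neg h, List.drop_eq_nil_iff.mpr (by omega)]
      simp [pvScan]

-- ===== VERDICT (by name: the statement is the Claim_ definition above) =====
theorem find_fp_regions_spec : Claim_equal_find_fp_regions := by
  intro true_arr pred_arr _ _
  unfold Spec_find_fp_regions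
  have hA := bridgeA true_arr pred_arr (PySem.List.pyRange 0 (true_arr.length : Int) 1) 0 [] none
      (Int.natCast_nonneg _) rfl
  have hB := bridgeB (pvMask true_arr pred_arr) (pvMask true_arr pred_arr).length 0 [] (by omega)
  simp only [List.drop_zero, List.nil_append, Nat.cast_zero] at hA hB
  unfold find_fp_regions find_fp_regions_alt
  rw [hB]
  unfold pvMask
  exact hA
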